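-- pv_equiv track=rewrite | github.com/PhamNhatMinh21/Python-CodePtit | kiem tra chia het.py | count_valid_numbers
-- ===== SOURCE A (Python) =====
-- from math import gcd
--
-- def lcm(a, b):
--     return a * b // gcd(a, b)
--
-- def count_multiples(L, R, k):
--     return (R // k) - ((L - 1) // k)
--
-- def count_valid_numbers(L, R, N):
--     total_count = R - L + 1
--     divisors = list(range(2, N + 1))
--     m = len(divisors)
--     excluded_count = 0
--
--     # Sử dụng nguyên lý bao hàm và loại trừ
--     for i in range(1, 1 << m):
--         lcm_value = 1
--         bits = bin(i).count('1')
--         for j in range(m):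
--             if i & (1 << j):
--                 lcm_value = lcm(lcm_value, divisors[j])
--                 if lcm_value > R:  # Nếu LCM lớn hơn R, không cần kiểm tra nữa
--                     break
--         else:
--             count = count_multiples(L, R, lcm_value)
--             if bits % 2 == 1:  # Nếu số lượng số chia hết là lẻ
--                 excluded_count += count
--             else:  # Nếu số lượng số chia hết là chẵn
--                 excluded_count -= count
--
--     return total_count - excluded_count
-- ===== SOURCE B (Python) =====
-- from math import gcd
--
-- def count_valid_numbers(L, R, N):
--     # Inclusion-exclusion grown incrementally: keep only signed lcm terms that
--     # stay <= R, so supersets of a pruned term are never generated at all.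
--     terms = [(1, 1)]
--     for d in range(2, N + 1):
--         grown = []
--         for (l, s) in terms:
--             nl = l * d // gcd(l, d)
--             if nl <= R:
--                 grown.append((nl, -s))
--         terms += grown
--     return sum(s * ((R // l) - ((L - 1) // l)) for (l, s) in terms)
-- ===== Notes on version B (the rewrite author's own statement) =====
-- stated objective: alternative
-- what changed: Replaces the 2^(N-1)-bitmask inclusion-exclusion loop (per-mask inner scan and popcount) by an incremental fold that grows a list of signed lcm terms, pruning every term whose lcm exceeds R so none of its supersets is ever generated.
import Mathlib
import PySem

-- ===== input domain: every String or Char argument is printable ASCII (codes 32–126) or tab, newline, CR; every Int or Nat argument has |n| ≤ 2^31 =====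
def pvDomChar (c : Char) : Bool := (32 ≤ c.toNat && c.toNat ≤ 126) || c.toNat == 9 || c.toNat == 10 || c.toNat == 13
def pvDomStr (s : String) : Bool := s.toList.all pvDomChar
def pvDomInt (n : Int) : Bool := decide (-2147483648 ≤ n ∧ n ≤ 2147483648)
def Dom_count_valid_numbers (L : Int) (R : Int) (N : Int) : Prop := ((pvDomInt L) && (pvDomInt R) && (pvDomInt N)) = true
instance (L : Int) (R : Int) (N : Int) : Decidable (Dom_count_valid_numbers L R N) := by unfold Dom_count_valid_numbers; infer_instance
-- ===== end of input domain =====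

-- B replaces A's full 2^(N-1)-mask inclusion-exclusion by an incremental fold over the
-- divisors that keeps only signed lcm terms ≤ R (pruned terms are never extended).

-- ===== PORT A =====
-- helper lcm(a, b) = a * b // gcd(a, b)
def pvLcm (a : Int) (b : Int) : Int := PySem.Int.floordiv (a * b) (Int.gcd a b)

-- helper count_multiples(L, R, k) = (R // k) - ((L - 1) // k)
def pvCountMultiples (L : Int) (R : Int) (k : Int) : Int :=
  PySem.Int.floordiv R k - PySem.Int.floordiv (L - 1) k

-- A's inner loop 'for j in range(m): if i & (1 << j): …' consuming one bit of the mask per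
-- divisor; returns none exactly where Python's 'break' skips the for-else count.
def pvInner (R : Int) : List Int → Nat → Int → Option Int
  | [], _, acc => some acc
  | d :: rest, mask, acc =>
    if mask % 2 = 1 then
      let l := pvLcm acc d
      if l > R then none else pvInner R rest (mask / 2) l
    else pvInner R rest (mask / 2) acc

def count_valid_numbers (L : Int) (R : Int) (N : Int) : Int :=
  let total := R - L + 1
  let divisors := PySem.List.pyRange 2 (N + 1) 1
  let m := divisors.length
  let excluded := (PySem.List.pyRange 1 (2 ^ m) 1).foldl (fun acc i =>
      let bits := PySem.Int.bitCount i     -- bin(i).count('1')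
      match pvInner R divisors i.toNat 1 with
      | none => acc
      | some l =>
        let c := pvCountMultiples L R l
        if bits % 2 = 1 then acc + c else acc - c) 0
  total - excluded

-- ===== PORT B =====
def count_valid_numbers_alt (L : Int) (R : Int) (N : Int) : Int :=
  let terms := (PySem.List.pyRange 2 (N + 1) 1).foldl
    (fun ts d => ts ++ ts.filterMap (fun p =>
        let nl := pvLcm p.1 d
        if nl ≤ R then some (nl, -p.2) else none))
    [((1 : Int), (1 : Int))]
  terms.foldl (fun s p => s + p.2 * pvCountMultiples L R p.1) 0

-- ===== PRECONDITION & SPEC =====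
def Spec_count_valid_numbers (L : Int) (R : Int) (N : Int) (out : Int) : Prop := out = count_valid_numbers_alt L R N
instance (L : Int) (R : Int) (N : Int) (out : Int) : Decidable (Spec_count_valid_numbers L R N out) := by unfold Spec_count_valid_numbers; infer_instance

-- ===== CLAIM (what is proved, stated in full; the proofs are below) =====
def Claim_equal_count_valid_numbers : Prop := ∀ (L : Int) (R : Int) (N : Int), Dom_count_valid_numbers L R N → Spec_count_valid_numbers L R N (count_valid_numbers L R N)

-- ===== LEMMAS AND PROOFS =====

-- B's one fold step and the term list it builds
def pvStep (R : Int) (ts : List (Int × Int)) (d : Int) : List (Int × Int) :=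
  ts ++ ts.filterMap (fun p =>
    let nl := pvLcm p.1 d
    if nl ≤ R then some (nl, -p.2) else none)

def pvTerms (R : Int) (ds : List Int) : List (Int × Int) :=
  ds.foldl (pvStep R) [((1 : Int), (1 : Int))]

-- (-1)^popcount i
def pvSgn (i : Nat) : Int := if PySem.Int.bitCount (i : Int) % 2 = 1 then -1 else 1

-- A's contribution of mask i, fed through an arbitrary F
def pvG (R : Int) (ds : List Int) (F : Int × Int → Int) (i : Nat) : Int :=
  match pvInner R ds i 1 with
  | none => 0
  | some l => F (l, pvSgn i)

lemma pvInner_zero (R : Int) (ds : List Int) (acc : Int) : pvInner R ds 0 acc = some acc := by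
  induction ds generalizing acc with
  | nil => rfl
  | cons d t ih => simp [pvInner, ih]

lemma pvInner_add_pow (R : Int) (ds : List Int) (i : Nat) (acc : Int) :
    pvInner R ds (i + 2 ^ ds.length) acc = pvInner R ds i acc := by
  induction ds generalizing i acc with
  | nil => rfl
  | cons d t ih =>
    have e1 : (i + 2 ^ (d :: t).length) % 2 = i % 2 := by
      simp only [List.length_cons, pow_succ]; omega
    have e2 : (i + 2 ^ (d :: t).length) / 2 = i / 2 + 2 ^ t.length := by
      simp only [List.length_cons, pow_succ]; omega
    simp only [pvInner, e1, e2, ih]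

lemma pvInner_append (R : Int) (ds : List Int) (d : Int) (mask : Nat) (acc : Int) :
    pvInner R (ds ++ [d]) mask acc =
      match pvInner R ds mask acc with
      | none => none
      | some l =>
        if (mask / 2 ^ ds.length) % 2 = 1 then
          (if pvLcm l d > R then none else some (pvLcm l d))
        else some l := by
  induction ds generalizing mask acc with
  | nil => simp [pvInner]
  | cons d' t ih =>
    have e : mask / 2 / 2 ^ t.length = mask / 2 ^ (d' :: t).length := by
      rw [Nat.div_div_eq_div_mul, List.length_cons, pow_succ, mul_comm]
    simp only [List.cons_append, pvInner]
    by_cases h1 : mask % 2 = 1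
    · simp only [if_pos h1]
      by_cases h2 : pvLcm acc d' > R
      · simp only [if_pos h2]
      · simp only [if_neg h2]; rw [ih, e]
    · simp only [if_neg h1]; rw [ih, e]

lemma pvBitCount_add_pow (m : Nat) : ∀ i : Nat, i < 2 ^ m →
    PySem.Int.bitCount ((i + 2 ^ m : Nat) : Int) = PySem.Int.bitCount ((i : Nat) : Int) + 1 := by
  induction m with
  | zero =>
    intro i hi
    interval_cases i
    decide
  | succ m ih =>
    intro i hi
    rw [PySem.Int.bitCount_natCast (show 0 < i + 2 ^ (m + 1) by positivity)]
    have e1 : (i + 2 ^ (m + 1)) % 2 = i % 2 := by rw [pow_succ]; omega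
    have e2 : (i + 2 ^ (m + 1)) / 2 = i / 2 + 2 ^ m := by rw [pow_succ]; omega
    have hlt : i / 2 < 2 ^ m := by
      have := hi; rw [pow_succ] at this; omega
    rw [e1, e2, ih (i / 2) hlt]
    by_cases h0 : i = 0
    · subst h0; simp
    · rw [PySem.Int.bitCount_natCast (show 0 < i by omega)]
      omega

lemma pvSgn_add_pow (m i : Nat) (h : i < 2 ^ m) : pvSgn (2 ^ m + i) = -pvSgn i := by
  unfold pvSgn
  rw [Nat.add_comm, pvBitCount_add_pow m i h]
  by_cases hp : PySem.Int.bitCount ((i : Nat) : Int) % 2 = 1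
  · have : (PySem.Int.bitCount ((i : Nat) : Int) + 1) % 2 = 0 := by omega
    simp [hp, this]
  · have : (PySem.Int.bitCount ((i : Nat) : Int) + 1) % 2 = 1 := by omega
    simp [hp, this]

lemma pvG_low (R : Int) (ds : List Int) (d : Int) (F : Int × Int → Int) (i : Nat)
    (h : i < 2 ^ ds.length) : pvG R (ds ++ [d]) F i = pvG R ds F i := by
  unfold pvG
  rw [pvInner_append]
  have : i / 2 ^ ds.length = 0 := Nat.div_eq_of_lt h
  rw [this]
  cases pvInner R ds i 1 <;> simp

lemma pvG_high (R : Int) (ds : List Int) (d : Int) (F : Int × Int → Int) (i : Nat)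
    (h : i < 2 ^ ds.length) :
    pvG R (ds ++ [d]) F (2 ^ ds.length + i) =
      pvG R ds (fun p => if pvLcm p.1 d ≤ R then F (pvLcm p.1 d, -p.2) else 0) i := by
  unfold pvG
  rw [pvInner_append]
  have e0 : 2 ^ ds.length + i = i + 2 ^ ds.length := Nat.add_comm _ _
  rw [e0, pvInner_add_pow]
  have e1 : (i + 2 ^ ds.length) / 2 ^ ds.length = 1 := by
    rw [Nat.add_div_right _ (Nat.two_pow_pos _), Nat.div_eq_of_lt h]
  rw [e1]
  cases hinner : pvInner R ds i 1 with
  | none => simp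
  | some l =>
    simp only [reduceIte]
    rw [← e0, pvSgn_add_pow ds.length i h]
    split_ifs with hle
    · exfalso; omega
    · simp
    · rfl
    · exfalso; omega

lemma pvSum_filterMap (R d : Int) (F : Int × Int → Int) (xs : List (Int × Int)) :
    ((xs.filterMap (fun p =>
        let nl := pvLcm p.1 d
        if nl ≤ R then some (nl, -p.2) else none)).map F).sum
      = (xs.map (fun p => if pvLcm p.1 d ≤ R then F (pvLcm p.1 d, -p.2) else 0)).sum := by
  induction xs with
  | nil => simp
  | cons p t ih =>
    by_cases h : pvLcm p.1 d ≤ R <;>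
      simp [h, ih]

lemma pvMain (R : Int) (ds : List Int) : ∀ F : Int × Int → Int,
    ((pvTerms R ds).map F).sum = ((List.range (2 ^ ds.length)).map (pvG R ds F)).sum := by
  induction ds using List.reverseRecOn with
  | nil =>
    intro F
    simp [pvTerms, pvG, pvInner, pvSgn]
  | append_singleton ds d ih =>
    intro F
    have hterms : pvTerms R (ds ++ [d]) = pvStep R (pvTerms R ds) d := by
      simp [pvTerms, List.foldl_append]
    rw [hterms]
    unfold pvStep
    rw [List.map_append, List.sum_append, pvSum_filterMap, ih, ih]
    have hlen : (ds ++ [d]).length = ds.length + 1 := by simp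
    rw [hlen, pow_succ, mul_two, List.range_add, List.map_append, List.sum_append]
    congr 1
    · exact congrArg List.sum
        (List.map_congr_left fun k hk => (pvG_low R ds d F k (List.mem_range.mp hk)).symm)
    · rw [List.map_map]
      exact congrArg List.sum
        (List.map_congr_left fun k hk => by
          simpa using (pvG_high R ds d F k (List.mem_range.mp hk)).symm)

lemma pvFoldl_add {α : Type} (body : Int → α → Int) (e : α → Int)
    (h : ∀ acc x, body acc x = acc + e x) :
    ∀ (l : List α) (init : Int), l.foldl body init = init + (l.map e).sum := by
  intro l
  induction l with
  | nil => intro init; simp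
  | cons x t ih =>
    intro init
    rw [List.foldl_cons, ih, h]
    simp [add_assoc]

-- A's per-mask contribution, as Python computes it
def pvE (L R : Int) (ds : List Int) (i : Int) : Int :=
  match pvInner R ds i.toNat 1 with
  | none => 0
  | some l =>
    if PySem.Int.bitCount i % 2 = 1 then pvCountMultiples L R l else -pvCountMultiples L R l

lemma pvE_eq_neg_G (L R : Int) (ds : List Int) (k : Nat) :
    pvE L R ds (k : Int) = -pvG R ds (fun p => p.2 * pvCountMultiples L R p.1) k := by
  unfold pvE pvG pvSgn
  rw [Int.toNat_natCast]
  cases pvInner R ds k 1 with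
  | none => simp
  | some l =>
    by_cases h : PySem.Int.bitCount ((k : Nat) : Int) % 2 = 1 <;> simp [h]

lemma pvCM_one (L R : Int) : pvCountMultiples L R 1 = R - L + 1 := by
  unfold pvCountMultiples
  rw [PySem.Int.floordiv_eq_ediv_of_pos (show (0:Int) < 1 by norm_num),
      PySem.Int.floordiv_eq_ediv_of_pos (show (0:Int) < 1 by norm_num)]
  simp only [Int.ediv_one]
  ring

lemma pvMain_final (L R N : Int) : count_valid_numbers L R N = count_valid_numbers_alt L R N := by
  have hAdef : count_valid_numbers L R N = (R - L + 1) -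
      (PySem.List.pyRange 1 (2 ^ (PySem.List.pyRange 2 (N + 1) 1).length) 1).foldl (fun acc i =>
        match pvInner R (PySem.List.pyRange 2 (N + 1) 1) i.toNat 1 with
        | none => acc
        | some l =>
          if PySem.Int.bitCount i % 2 = 1 then acc + pvCountMultiples L R l
          else acc - pvCountMultiples L R l) 0 := rfl
  have hBdef : count_valid_numbers_alt L R N =
      (pvTerms R (PySem.List.pyRange 2 (N + 1) 1)).foldl
        (fun s p => s + p.2 * pvCountMultiples L R p.1) 0 := rfl
  rw [hAdef, hBdef]
  set ds := PySem.List.pyRange 2 (N + 1) 1 with hds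
  set m := ds.length with hm
  set F₀ : Int × Int → Int := fun p => p.2 * pvCountMultiples L R p.1 with hF
  -- B side
  have hB : (pvTerms R ds).foldl (fun s p => s + p.2 * pvCountMultiples L R p.1) 0
      = ((pvTerms R ds).map F₀).sum := by
    rw [pvFoldl_add _ F₀ (fun _ _ => rfl)]; simp
  -- A side: foldl to sum of pvE
  have hA : ∀ l : List Int, l.foldl (fun acc i =>
      match pvInner R ds i.toNat 1 with
      | none => acc
      | some l =>
        if PySem.Int.bitCount i % 2 = 1 then acc + pvCountMultiples L R l
        else acc - pvCountMultiples L R l) 0 = (l.map (pvE L R ds)).sum := by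
    intro l
    rw [pvFoldl_add _ (pvE L R ds) ?_ l 0]
    · simp
    · intro acc i
      unfold pvE
      cases pvInner R ds i.toNat 1 with
      | none => simp
      | some v =>
        by_cases h : PySem.Int.bitCount i % 2 = 1
        · simp [h]
        · simp [h]
          ring
  rw [hA]
  -- split range(0, 2^m) = [0] ++ range(1, 2^m)
  have h1 : (1 : Int) ≤ 2 ^ m := one_le_pow₀ (by norm_num)
  have hsplit : PySem.List.pyRange 0 (2 ^ m) 1
      = PySem.List.pyRange 0 1 1 ++ PySem.List.pyRange 1 (2 ^ m) 1 :=
    PySem.List.pyRange_one_append 0 1 (2 ^ m) (by norm_num) h1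
  have hz : PySem.List.pyRange 0 1 1 = [0] := by
    have := PySem.List.pyRange_one_singleton (0 : Int)
    simpa using this
  have hcast : ((2 : Int) ^ m) = (((2 ^ m : Nat) : Int)) := by push_cast; ring
  have hnat : PySem.List.pyRange 0 (2 ^ m) 1 = (List.range (2 ^ m)).map (fun (k : Nat) => (k : Int)) := by
    rw [hcast]
    exact PySem.List.pyRange_zero_nat (2 ^ m)
  have hE0 : pvE L R ds 0 = -(R - L + 1) := by
    unfold pvE
    simp [pvInner_zero, pvCM_one]
  have hsum : ((List.range (2 ^ m)).map (fun (k : Nat) => pvE L R ds (k : Int))).sum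
      = -(((List.range (2 ^ m)).map (pvG R ds F₀)).sum) := by
    have he : ((List.range (2 ^ m)).map (fun (k : Nat) => pvE L R ds (k : Int)))
        = ((List.range (2 ^ m)).map (fun (k : Nat) => -(pvG R ds F₀ k))) :=
      List.map_congr_left (fun k _ => pvE_eq_neg_G L R ds k)
    rw [he]
    induction (List.range (2 ^ m)) with
    | nil => simp
    | cons a t ih => simp [ih]; ring
  have hall : ((PySem.List.pyRange 0 (2 ^ m) 1).map (pvE L R ds)).sum
      = pvE L R ds 0 + ((PySem.List.pyRange 1 (2 ^ m) 1).map (pvE L R ds)).sum := by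
    rw [hsplit, List.map_append, List.sum_append, hz]; simp
  have hall' : ((PySem.List.pyRange 0 (2 ^ m) 1).map (pvE L R ds)).sum
      = -(((List.range (2 ^ m)).map (pvG R ds F₀)).sum) := by
    rw [hnat, List.map_map]
    exact hsum
  have key : ((PySem.List.pyRange 1 (2 ^ m) 1).map (pvE L R ds)).sum
      = -(((List.range (2 ^ m)).map (pvG R ds F₀)).sum) + (R - L + 1) := by
    have h := hall
    rw [hall', hE0] at h
    omega
  rw [key, hB, pvMain R ds F₀]
  ring

-- ===== VERDICT (by name: the statement is the Claim_ definition above) =====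
theorem count_valid_numbers_spec : Claim_equal_count_valid_numbers := by
  intro L R N _
  unfold Spec_count_valid_numbers
  exact pvMain_final L R N
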